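-- pv_equiv track=rewrite | github.com/swapnilk30/python-2026 | fyers-api/symbol_utils.py | group_by_exchange
-- ===== SOURCE A (Python) =====
-- from typing import List, Dict, Any, Optional
--
-- def group_by_exchange(symbols: List[str]) -> Dict[str, List[str]]:
--     """
--     Group symbols by exchange.
--
--     Args:
--         symbols: List of Fyers symbols
--
--     Returns:
--         Dictionary grouped by exchange
--     """
--     grouped = {}
--
--     for symbol in symbols:
--         exchange = symbol.split(':')[0] if ':' in symbol else 'UNKNOWN'
--         if exchange not in grouped:
--             grouped[exchange] = []
--         grouped[exchange].append(symbol)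
--
--     return grouped
-- ===== SOURCE B (Python) =====
-- def group_by_exchange(symbols):
--     """Group symbols by exchange: dedup the keys in first-occurrence order,
--     then build each group with a per-key filter pass."""
--     def key(s):
--         return s.split(':')[0] if ':' in s else 'UNKNOWN'
--     keys = list(dict.fromkeys(key(s) for s in symbols))
--     return {k: [s for s in symbols if key(s) == k] for k in keys}
-- ===== Notes on version B (the rewrite author's own statement) =====
-- stated objective: alternative
-- what changed: Replaces A's single-pass dict-accumulation loop by a two-phase computation: first dedup the exchange keys in first-occurrence order, then build each group with a per-key filter over the input list.
import Mathlib
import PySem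

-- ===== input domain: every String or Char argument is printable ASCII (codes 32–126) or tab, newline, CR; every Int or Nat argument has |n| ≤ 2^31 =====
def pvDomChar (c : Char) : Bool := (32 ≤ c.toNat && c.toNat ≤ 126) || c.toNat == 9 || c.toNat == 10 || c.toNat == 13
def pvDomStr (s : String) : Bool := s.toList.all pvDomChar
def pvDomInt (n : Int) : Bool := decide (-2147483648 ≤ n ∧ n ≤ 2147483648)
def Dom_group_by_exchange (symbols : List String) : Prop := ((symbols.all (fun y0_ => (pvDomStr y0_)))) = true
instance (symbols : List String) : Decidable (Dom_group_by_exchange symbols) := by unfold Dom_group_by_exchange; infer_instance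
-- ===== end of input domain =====

-- B replaces A's single-pass dict-accumulation loop by a two-phase computation (dedup the
-- exchange keys in first-occurrence order, then a per-key filter builds each group); same cost class, alternative structure.


-- ===== PORT A =====
-- shared key helper: exchange = symbol.split(':')[0] if ':' in symbol else 'UNKNOWN'
-- (identical expression in both Pythons; the .getD defaults only totalise: split? of a
-- non-empty separator is always some, and Python's split always returns a non-empty list)
def pvKey (s : String) : String :=
  if PySem.Str.isIn ":" s then (PySem.List.pyGet? ((PySem.Str.split? s ":").getD []) 0).getD "" else "UNKNOWN"

def group_by_exchange (symbols : List String) : List (String × List String) :=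
  (symbols.foldl (fun grouped symbol =>
      let exchange := pvKey symbol
      let grouped := if grouped.contains exchange then grouped
                     else grouped.insert exchange ([] : List String)
      grouped.modify exchange [] (fun l => l ++ [symbol]))
    (PySem.Dict.empty : PySem.Dict String (List String))).items

-- ===== PORT B =====
def group_by_exchange_alt (symbols : List String) : List (String × List String) :=
  (PySem.List.dedup (symbols.map pvKey)).map
    (fun k => (k, symbols.filter (fun s => pvKey s == k)))

-- ===== PRECONDITION & SPEC =====
def Spec_group_by_exchange (symbols : List String) (out : List (String × List String)) : Prop := out = group_by_exchange_alt symbols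
instance (symbols : List String) (out : List (String × List String)) : Decidable (Spec_group_by_exchange symbols out) := by unfold Spec_group_by_exchange; infer_instance

-- ===== CLAIM (what is proved, stated in full; the proofs are below) =====
def Claim_equal_group_by_exchange : Prop := ∀ (symbols : List String), Dom_group_by_exchange symbols → Spec_group_by_exchange symbols (group_by_exchange symbols)

-- ===== LEMMAS AND PROOFS =====

-- A's loop body, named for the proofs
def pvStep (d : PySem.Dict String (List String)) (symbol : String) : PySem.Dict String (List String) :=
  let exchange := pvKey symbol
  let d := if d.contains exchange then d else d.insert exchange ([] : List String)
  d.modify exchange [] (fun l => l ++ [symbol])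

lemma find_map_pair {h : String → List String} (l : List String) (k : String) :
    List.find? (fun p => p.1 == k) (l.map (fun k' => (k', h k'))) =
      if k ∈ l then some (k, h k) else none := by
  induction l with
  | nil => simp
  | cons a l ih =>
    by_cases hak : a = k
    · subst hak; simp
    · simp [hak, Ne.symm hak, ih]
lemma dedup_append_singleton {α : Type} [BEq α] [LawfulBEq α] (l : List α) (a : α) :
    PySem.List.dedup (l ++ [a]) =
      if a ∈ l then PySem.List.dedup l else PySem.List.dedup l ++ [a] := by
  show PySem.Set.ofList (l ++ [a]) = _
  rw [PySem.Set.ofList, List.foldl_append]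
  simp only [List.foldl_cons, List.foldl_nil, PySem.Set.add]
  have : (List.foldl PySem.Set.add PySem.Set.empty l).contains a = (a ∈ l : Bool) := by
    simp
    exact ⟨fun h => (PySem.Set.mem_ofList l a).1 h, fun h => (PySem.Set.mem_ofList l a).2 h⟩
  rw [this]
  by_cases h : a ∈ l <;> simp [h] <;> rfl
lemma filter_eq_nil_of_not_mem_map (ys : List String) (k : String)
    (h : k ∉ ys.map pvKey) : ys.filter (fun s => pvKey s == k) = [] := by
  rw [List.filter_eq_nil_iff]
  intro s hs
  simp only [beq_iff_eq]
  intro hk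
  exact h (List.mem_map.2 ⟨s, hs, hk⟩)

lemma alt_items (ys : List String) :
    group_by_exchange_alt ys = (PySem.List.dedup (ys.map pvKey)).map
      (fun k => (k, ys.filter (fun s => pvKey s == k))) := rfl

lemma contains_alt (ys : List String) (k : String) :
    (PySem.Dict.mk (group_by_exchange_alt ys)).contains k = (k ∈ ys.map pvKey : Bool) := by
  simp only [PySem.Dict.contains, PySem.Dict.items, alt_items, List.any_map, Function.comp_def]
  simp only [List.any_beq']
  simp [List.contains_iff_mem, PySem.Set.mem_ofList]

lemma getD_alt (ys : List String) (k : String) (hmem : k ∈ ys.map pvKey) :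
    (PySem.Dict.mk (group_by_exchange_alt ys)).getD k []
      = ys.filter (fun s => pvKey s == k) := by
  simp only [PySem.Dict.getD, PySem.Dict.get?, PySem.Dict.items, alt_items]
  rw [find_map_pair, if_pos (by simpa [PySem.List.mem_dedup] using hmem)]
  rfl

lemma step_alt (ys : List String) (x : String) :
    pvStep (PySem.Dict.mk (group_by_exchange_alt ys)) x =
      PySem.Dict.mk (group_by_exchange_alt (ys ++ [x])) := by
  have hfilt : ∀ k, (ys ++ [x]).filter (fun s => pvKey s == k)
      = ys.filter (fun s => pvKey s == k) ++ (if pvKey x = k then [x] else []) := by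
    intro k; rw [List.filter_append, List.filter_singleton]; by_cases h : pvKey x = k <;> simp [Bool.cond_eq_ite, beq_iff_eq, h]
  by_cases hmem : pvKey x ∈ ys.map pvKey
  · -- existing key: the loop only appends into the matching group
    have hded : PySem.List.dedup ((ys ++ [x]).map pvKey) = PySem.List.dedup (ys.map pvKey) := by
      rw [List.map_append, List.map_singleton, dedup_append_singleton, if_pos hmem]
    simp only [pvStep, contains_alt ys (pvKey x), hmem, decide_true, if_true,
      PySem.Dict.modify, getD_alt ys (pvKey x) hmem, PySem.Dict.insert,
      contains_alt ys (pvKey x), PySem.Dict.items]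
    apply congrArg PySem.Dict.mk
    rw [alt_items ys, alt_items (ys ++ [x]), hded, List.map_map]
    apply List.map_congr_left
    intro k _
    by_cases hk : k = pvKey x
    · subst hk; simp [hfilt]
    · simp [Function.comp, hk, Ne.symm hk, hfilt k]
  · -- new key: it is appended at the end with the single group [x]
    have hded : PySem.List.dedup ((ys ++ [x]).map pvKey)
        = PySem.List.dedup (ys.map pvKey) ++ [pvKey x] := by
      rw [List.map_append, List.map_singleton, dedup_append_singleton, if_neg hmem]
    have hmemd : pvKey x ∉ PySem.List.dedup (ys.map pvKey) := by
      simpa [PySem.List.mem_dedup] using hmem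
    -- after the insert of the empty group, the items are alt ys ++ [(pvKey x, [])]
    have hins : (PySem.Dict.mk (group_by_exchange_alt ys)).insert (pvKey x) ([] : List String)
        = PySem.Dict.mk (group_by_exchange_alt ys ++ [(pvKey x, [])]) := by
      simp only [PySem.Dict.insert, contains_alt ys (pvKey x), hmem, decide_false]
      simp
    have hget : (PySem.Dict.mk (group_by_exchange_alt ys ++ [(pvKey x, [])])).getD (pvKey x) []
        = ([] : List String) := by
      simp only [PySem.Dict.getD, PySem.Dict.get?, PySem.Dict.items, alt_items,
        List.find?_append, find_map_pair, if_neg hmemd]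
      simp
    have hcont2 : (PySem.Dict.mk (group_by_exchange_alt ys ++ [(pvKey x, [])])).contains (pvKey x) = true := by
      simp [PySem.Dict.contains]
    simp only [pvStep, contains_alt ys (pvKey x), hmem, decide_false, Bool.false_eq_true,
      if_false, PySem.Dict.modify, hins, hget, PySem.Dict.insert, hcont2, if_true,
      PySem.Dict.items, List.nil_append]
    apply congrArg PySem.Dict.mk
    rw [List.map_append, alt_items ys, alt_items (ys ++ [x]), hded, List.map_append,
      List.map_map, List.map_singleton, List.map_singleton]
    congr 1
    · apply List.map_congr_left
      intro k hk
      have hkne : k ≠ pvKey x := fun h => hmemd (h ▸ hk)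
      simp [Function.comp, hkne, Ne.symm hkne, hfilt k]
    · simp [hfilt, filter_eq_nil_of_not_mem_map ys (pvKey x) hmem]

lemma loop_alt (xs ys : List String) :
    xs.foldl pvStep (PySem.Dict.mk (group_by_exchange_alt ys)) =
      PySem.Dict.mk (group_by_exchange_alt (ys ++ xs)) := by
  induction xs generalizing ys with
  | nil => simp
  | cons x xs ih =>
    rw [List.foldl_cons, step_alt, ih]
    simp

-- ===== VERDICT (by name: the statement is the Claim_ definition above) =====
theorem group_by_exchange_spec : Claim_equal_group_by_exchange := by
  intro symbols _
  show group_by_exchange symbols = group_by_exchange_alt symbols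
  unfold group_by_exchange
  rw [show (fun (grouped : PySem.Dict String (List String)) (symbol : String) =>
      let exchange := pvKey symbol
      let grouped := if grouped.contains exchange then grouped
                     else grouped.insert exchange ([] : List String)
      grouped.modify exchange [] (fun l => l ++ [symbol])) = pvStep from rfl]
  rw [show (PySem.Dict.empty : PySem.Dict String (List String)) =
      PySem.Dict.mk (group_by_exchange_alt []) from rfl]
  rw [loop_alt]
  simp
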